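-- pv_equiv track=rewrite | github.com/heejin42/study_algorithm | hackerrank/softeer/3_나무수확.py | solution
-- ===== SOURCE A (Python) =====
-- def solution(n, graph):
--     yet_dp = [[0 for _ in range(n+1)] for _ in range(n+1)]
--     done_dp = [[0 for _ in range(n+1)] for _ in range(n+1)]
--     yet_dp[1][1] = graph[0][0]
--     done_dp[1][1] = graph[0][0]*2
--     # dp[i][j] = dp[i-1][j] or dp[i][j-1] + 현재
--     # 순서는 1행, 1열, 2행, 2열 ...
--     for r in range(1, n+1):
--         for c in range(1, n+1):# 행
--             yet_dp[r][c] = max(yet_dp[r-1][c], yet_dp[r][c-1]) + graph[r-1][c-1]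
--             done_dp[r][c] = max(max(done_dp[r-1][c], done_dp[r][c-1]) + graph[r-1][c-1], max(yet_dp[r-1][c], yet_dp[r][c-1]) + (graph[r-1][c-1]*2))
--     return done_dp[n][n]
-- ===== SOURCE B (Python) =====
-- def solution(n, graph):
--     # Top-down memoized recursion over (row, col, doubled) instead of A's
--     # bottom-up fill of two (n+1)x(n+1) tables; indices are 1-based with
--     # r==0/c==0 playing the role of A's zero padding.
--     memo = {}
--
--     def f(r, c, doubled):
--         if r == 0 or c == 0:
--             return 0
--         key = (r, c, doubled)
--         if key in memo:
--             return memo[key]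
--         v = graph[r - 1][c - 1]
--         if doubled:
--             res = max(max(f(r - 1, c, True), f(r, c - 1, True)) + v,
--                       max(f(r - 1, c, False), f(r, c - 1, False)) + 2 * v)
--         else:
--             res = max(f(r - 1, c, False), f(r, c - 1, False)) + v
--         memo[key] = res
--         return res
--
--     return f(n, n, True)
-- ===== Notes on version B (the rewrite author's own statement) =====
-- stated objective: alternative
-- what changed: A fills two (n+1)x(n+1) zero-padded DP tables bottom-up row by row; B is a top-down memoized recursion f(r,c,doubled) on demand, keyed by (row, col, doubled) in one dict, with r==0/c==0 as the base case standing for A's zero padding.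
import Mathlib
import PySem

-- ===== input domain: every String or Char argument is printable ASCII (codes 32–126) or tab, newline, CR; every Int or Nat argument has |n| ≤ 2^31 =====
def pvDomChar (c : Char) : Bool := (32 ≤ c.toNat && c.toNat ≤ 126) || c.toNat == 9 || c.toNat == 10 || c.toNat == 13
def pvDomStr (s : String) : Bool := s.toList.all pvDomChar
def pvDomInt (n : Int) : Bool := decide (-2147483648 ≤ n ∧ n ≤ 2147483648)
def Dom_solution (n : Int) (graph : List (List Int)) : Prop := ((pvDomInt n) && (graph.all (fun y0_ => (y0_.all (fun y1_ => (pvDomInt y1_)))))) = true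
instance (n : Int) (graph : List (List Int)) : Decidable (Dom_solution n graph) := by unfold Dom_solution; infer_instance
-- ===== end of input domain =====

-- B replaces A's bottom-up fill of two (n+1)×(n+1) zero-padded DP tables by a top-down
-- memoized recursion f(r, c, doubled) keyed by (row, col, doubled) in one dictionary.

-- ===== PORT A =====
-- m[i][j] (Pre_ keeps every such access in range)
def pvGet2 (m : List (List Int)) (i j : Int) : Int :=
  PySem.List.pyGetD (PySem.List.pyGetD m i []) j 0

-- m[i][j] = v (Pre_ keeps every such assignment in range)
def pvSet2 (m : List (List Int)) (i j : Int) (v : Int) : List (List Int) :=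
  PySem.List.pySetD m i (PySem.List.pySetD (PySem.List.pyGetD m i []) j v)

-- body of A's inner loop (the two assignments for cell (r, c))
def aStep (graph : List (List Int)) (r : Int) (st : List (List Int) × List (List Int))
    (c : Int) : List (List Int) × List (List Int) :=
  let v := pvGet2 graph (r-1) (c-1)
  let yet' := pvSet2 st.1 r c (max (pvGet2 st.1 (r-1) c) (pvGet2 st.1 r (c-1)) + v)
  let done' := pvSet2 st.2 r c
    (max (max (pvGet2 st.2 (r-1) c) (pvGet2 st.2 r (c-1)) + v)
         (max (pvGet2 yet' (r-1) c) (pvGet2 yet' r (c-1)) + v * 2))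
  (yet', done')

-- body of A's outer loop (one value of r)
def aRow (n : Int) (graph : List (List Int)) (st : List (List Int) × List (List Int))
    (r : Int) : List (List Int) × List (List Int) :=
  (PySem.List.pyRange 1 (n+1) 1).foldl (aStep graph r) st

def solution (n : Int) (graph : List (List Int)) : Int :=
  let row0 : List Int := (PySem.List.pyRange 0 (n+1) 1).map (fun _ => 0)
  let yet_dp0 : List (List Int) := (PySem.List.pyRange 0 (n+1) 1).map (fun _ => row0)
  let done_dp0 : List (List Int) := (PySem.List.pyRange 0 (n+1) 1).map (fun _ => row0)
  let yet_dp1 := pvSet2 yet_dp0 1 1 (pvGet2 graph 0 0)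
  let done_dp1 := pvSet2 done_dp0 1 1 (pvGet2 graph 0 0 * 2)
  let st := (PySem.List.pyRange 1 (n+1) 1).foldl (aRow n graph) (yet_dp1, done_dp1)
  pvGet2 st.2 n n

-- ===== PORT B =====
-- Source B's memoized recursion f(r, c, doubled); the memo dict is threaded as state, the
-- recursion variables are the 1-based Nat indices (Pre_ has n ≥ 1, so n.toNat is exact),
-- and graph[r-1][c-1] is read with pyGetD (Pre_ keeps it in range).
def bMemo (graph : List (List Int)) :
    Nat → Nat → Bool → PySem.Dict (Nat × Nat × Bool) Int →
      Int × PySem.Dict (Nat × Nat × Bool) Int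
  | 0, _, _, memo => (0, memo)
  | _+1, 0, _, memo => (0, memo)
  | r+1, c+1, d, memo =>
    match memo.get? (r+1, c+1, d) with
    | some res => (res, memo)
    | none =>
      let v := PySem.List.pyGetD (PySem.List.pyGetD graph (r : Int) []) (c : Int) 0
      if d then
        let p1 := bMemo graph r (c+1) true memo
        let p2 := bMemo graph (r+1) c true p1.2
        let p3 := bMemo graph r (c+1) false p2.2
        let p4 := bMemo graph (r+1) c false p3.2
        let res := max (max p1.1 p2.1 + v) (max p3.1 p4.1 + 2 * v)
        (res, p4.2.insert (r+1, c+1, d) res)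
      else
        let p1 := bMemo graph r (c+1) false memo
        let p2 := bMemo graph (r+1) c false p1.2
        let res := max p1.1 p2.1 + v
        (res, p2.2.insert (r+1, c+1, d) res)
  termination_by r c _ _ => r + c

def solution_alt (n : Int) (graph : List (List Int)) : Int :=
  (bMemo graph n.toNat n.toNat true PySem.Dict.empty).1

-- ===== PRECONDITION & SPEC =====
-- Pre_: exactly the inputs on which A returns (A writes yet_dp[1][1] and reads graph[r][c]
-- for all 0 ≤ r,c < n, so it raises IndexError unless n ≥ 1 and the grid covers n×n).
def Pre_solution (n : Int) (graph : List (List Int)) : Prop :=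
  1 ≤ n ∧ n ≤ (graph.length : Int) ∧ ∀ row ∈ graph.take n.toNat, n ≤ (row.length : Int)
instance (n : Int) (graph : List (List Int)) : Decidable (Pre_solution n graph) := by
  unfold Pre_solution; infer_instance

def pvWitness_solution : Int × List (List Int) := (2, [[1, -2], [3, 4]])

def Spec_solution (n : Int) (graph : List (List Int)) (out : Int) : Prop := out = solution_alt n graph
instance (n : Int) (graph : List (List Int)) (out : Int) : Decidable (Spec_solution n graph out) := by unfold Spec_solution; infer_instance

-- ===== CLAIM (what is proved, stated in full; the proofs are below) =====
def Claim_equal_solution : Prop := ∀ (n : Int) (graph : List (List Int)), Dom_solution n graph → Pre_solution n graph → Spec_solution n graph (solution n graph)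

-- ===== LEMMAS AND PROOFS =====

-- grid value graph[i][j] as a total function on Nat indices
def gv (graph : List (List Int)) (i j : Nat) : Int := (graph.getD i []).getD j 0

-- the DP recurrence both programs compute: best path value to 1-based cell (r, c),
-- doubling not yet used (fY) / already used (fD); index 0 is the zero padding row/column
def fY (g : Nat → Nat → Int) : Nat → Nat → Int
  | 0, _ => 0
  | _+1, 0 => 0
  | r+1, c+1 => max (fY g r (c+1)) (fY g (r+1) c) + g r c
  termination_by r c => (r, c)

def fD (g : Nat → Nat → Int) : Nat → Nat → Int
  | 0, _ => 0
  | _+1, 0 => 0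
  | r+1, c+1 => max (max (fD g r (c+1)) (fD g (r+1) c) + g r c)
                    (max (fY g r (c+1)) (fY g (r+1) c) + g r c * 2)
  termination_by r c => (r, c)

theorem fY_zero_left (g : Nat → Nat → Int) (c : Nat) : fY g 0 c = 0 := by cases c <;> simp [fY]
theorem fY_zero_right (g : Nat → Nat → Int) (r : Nat) : fY g r 0 = 0 := by cases r <;> simp [fY]
theorem fD_zero_left (g : Nat → Nat → Int) (c : Nat) : fD g 0 c = 0 := by cases c <;> simp [fD]
theorem fD_zero_right (g : Nat → Nat → Int) (r : Nat) : fD g r 0 = 0 := by cases r <;> simp [fD]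

/- ---------- B side: the memo invariant ---------- -/

-- every value stored in the memo is the recurrence's value at its key
def memOK (graph : List (List Int)) (memo : PySem.Dict (Nat × Nat × Bool) Int) : Prop :=
  ∀ r c d res, memo.get? (r, c, d) = some res →
    res = (if d then fD (gv graph) r c else fY (gv graph) r c)

theorem memOK_empty (graph : List (List Int)) : memOK graph PySem.Dict.empty := by
  intro r c d res h
  simp [PySem.Dict.get?_empty] at h

theorem memOK_insert (graph : List (List Int)) (memo : PySem.Dict (Nat × Nat × Bool) Int)
    (r c : Nat) (d : Bool) (h : memOK graph memo) :
    memOK graph (memo.insert (r, c, d) (if d then fD (gv graph) r c else fY (gv graph) r c)) := by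
  intro r' c' d' res hres
  rw [PySem.Dict.get?_insert] at hres
  by_cases hk : (r', c', d') = (r, c, d)
  · rw [if_pos hk] at hres
    rw [Prod.ext_iff, Prod.ext_iff] at hk
    obtain ⟨h1, h2, h3⟩ := hk
    subst h1; subst h2; subst h3
    exact (Option.some.inj hres).symm
  · rw [if_neg hk] at hres
    exact h r' c' d' res hres

theorem bMemo_correct (graph : List (List Int)) :
    ∀ N r c d memo, r + c ≤ N → memOK graph memo →
      (bMemo graph r c d memo).1 = (if d then fD (gv graph) r c else fY (gv graph) r c) ∧
        memOK graph (bMemo graph r c d memo).2 := by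
  intro N
  induction N with
  | zero =>
    intro r c d memo hN hm
    have hr : r = 0 := by omega
    subst hr
    cases d <;> simp [bMemo, fY_zero_left, fD_zero_left, hm]
  | succ N ih =>
    intro r c d memo hN hm
    match r, c with
    | 0, c => cases d <;> simp [bMemo, fY_zero_left, fD_zero_left, hm]
    | r+1, 0 => cases d <;> simp [bMemo, fY_zero_right, fD_zero_right, hm]
    | r+1, c+1 =>
      have hv : PySem.List.pyGetD (PySem.List.pyGetD graph (r : Int) []) (c : Int) 0
          = gv graph r c := by
        simp [PySem.List.pyGetD_natCast, gv]
      rcases hkey : memo.get? (r+1, c+1, d) with _ | res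
      · -- not memoized: recurse
        cases d
        · -- doubled = False
          obtain ⟨e1, m1⟩ := ih r (c+1) false memo (by omega) hm
          obtain ⟨e2, m2⟩ := ih (r+1) c false _ (by omega) m1
          simp only [bMemo, hkey]
          simp only [if_neg Bool.false_ne_true]
          constructor
          · rw [e1, e2, hv]; simp [fY]
          · have := memOK_insert graph _ (r+1) (c+1) false m2
            simp only [if_neg Bool.false_ne_true] at this
            have hval : max (bMemo graph r (c+1) false memo).1
                (bMemo graph (r+1) c false (bMemo graph r (c+1) false memo).2).1
                + PySem.List.pyGetD (PySem.List.pyGetD graph (r : Int) []) (c : Int) 0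
                = fY (gv graph) (r+1) (c+1) := by
              rw [e1, e2, hv]
              simp only [if_neg Bool.false_ne_true]
              simp [fY]
            rw [hval]
            exact this
        · -- doubled = True
          obtain ⟨e1, m1⟩ := ih r (c+1) true memo (by omega) hm
          obtain ⟨e2, m2⟩ := ih (r+1) c true _ (by omega) m1
          obtain ⟨e3, m3⟩ := ih r (c+1) false _ (by omega) m2
          obtain ⟨e4, m4⟩ := ih (r+1) c false _ (by omega) m3
          simp only [bMemo, hkey]
          simp only [if_neg Bool.false_ne_true] at e3 e4
          constructor
          · rw [e1, e2, e3, e4, hv]; simp [fD]; ring_nf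
          · have := memOK_insert graph _ (r+1) (c+1) true m4
            have hval : max
                (max (bMemo graph r (c+1) true memo).1
                     (bMemo graph (r+1) c true (bMemo graph r (c+1) true memo).2).1
                  + PySem.List.pyGetD (PySem.List.pyGetD graph (r : Int) []) (c : Int) 0)
                (max (bMemo graph r (c+1) false
                        (bMemo graph (r+1) c true (bMemo graph r (c+1) true memo).2).2).1
                     (bMemo graph (r+1) c false
                        (bMemo graph r (c+1) false
                          (bMemo graph (r+1) c true (bMemo graph r (c+1) true memo).2).2).2).1
                  + 2 * PySem.List.pyGetD (PySem.List.pyGetD graph (r : Int) []) (c : Int) 0)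
                = fD (gv graph) (r+1) (c+1) := by
              rw [e1, e2, e3, e4, hv]
              simp [fD]; ring_nf
            rw [hval]
            exact this
      · -- memoized hit
        have := hm (r+1) (c+1) d res hkey
        simp only [bMemo, hkey]
        exact ⟨this, hm⟩

-- B's port computes fD m m
theorem solution_alt_eq (graph : List (List Int)) (m : Nat) :
    solution_alt (m : Int) graph = fD (gv graph) m m := by
  unfold solution_alt
  rw [Int.toNat_natCast]
  have := (bMemo_correct graph (m + m) m m true PySem.Dict.empty (le_refl _)
    (memOK_empty graph)).1
  simpa using this

/- ---------- A side ---------- -/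

-- entry (i, j) of A's yet_dp (resp. done_dp) while cell (r, k) was the last one written
def AY (graph : List (List Int)) (r k i j : Nat) : Int :=
  if (1 ≤ i ∧ 1 ≤ j) ∧ (i < r ∨ (i = r ∧ j ≤ k)) then fY (gv graph) i j
  else if i = 1 ∧ j = 1 then gv graph 0 0 else 0

def AD (graph : List (List Int)) (r k i j : Nat) : Int :=
  if (1 ≤ i ∧ 1 ≤ j) ∧ (i < r ∨ (i = r ∧ j ≤ k)) then fD (gv graph) i j
  else if i = 1 ∧ j = 1 then gv graph 0 0 * 2 else 0

-- both tables keep their (m+1)×(m+1) shape and are described entrywise by F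
def Inv2 (m : Nat) (T : List (List Int)) (F : Nat → Nat → Int) : Prop :=
  T.length = m+1 ∧ (∀ i, i ≤ m → (T.getD i []).length = m+1) ∧
    (∀ i j, i ≤ m → j ≤ m → pvGet2 T (i : Int) (j : Int) = F i j)

theorem pvGet2_natCast (T : List (List Int)) (i j : Nat) :
    pvGet2 T (i : Int) (j : Int) = (T.getD i []).getD j 0 := by
  simp [pvGet2]

theorem pvSet2_natCast (T : List (List Int)) (a b : Nat) (v : Int) :
    pvSet2 T (a : Int) (b : Int) v = T.set a ((T.getD a []).set b v) := by
  simp [pvSet2]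

theorem Inv2_congr (m : Nat) (T : List (List Int)) (F F' : Nat → Nat → Int)
    (hT : Inv2 m T F) (h : ∀ i j, i ≤ m → j ≤ m → F i j = F' i j) : Inv2 m T F' := by
  obtain ⟨h1, h2, h3⟩ := hT
  exact ⟨h1, h2, fun i j hi hj => (h3 i j hi hj).trans (h i j hi hj)⟩

theorem Inv2_set (m : Nat) (T : List (List Int)) (F : Nat → Nat → Int) (a b : Nat) (v : Int)
    (hT : Inv2 m T F) (ha : a ≤ m) (hb : b ≤ m) :
    Inv2 m (pvSet2 T (a : Int) (b : Int) v)
      (fun i j => if i = a ∧ j = b then v else F i j) := by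
  obtain ⟨hL, hR, hE⟩ := hT
  rw [pvSet2_natCast]
  have haL : a < T.length := by omega
  have hbL : b < (T.getD a []).length := by rw [hR a ha]; omega
  have hgetD : ∀ i : Nat, (T.set a ((T.getD a []).set b v)).getD i [] =
      if a = i then (T.getD a []).set b v else T.getD i [] := by
    intro i
    rw [List.getD_eq_getElem?_getD, List.getElem?_set]
    by_cases h : a = i
    · subst h; simp [haL]
    · simp [h, List.getD_eq_getElem?_getD]
  refine ⟨by simp [hL], ?_, ?_⟩
  · intro i hi
    rw [hgetD i]
    by_cases h : a = i
    · subst h; rw [if_pos rfl, List.length_set]; exact hR a hi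
    · rw [if_neg h]; exact hR i hi
  · intro i j hi hj
    rw [pvGet2_natCast, hgetD i]
    by_cases h : a = i
    · subst h
      rw [if_pos rfl, List.getD_eq_getElem?_getD, List.getElem?_set]
      by_cases h2 : b = j
      · subst h2
        have hbL' : b < (T[a]?.getD []).length := by
          rw [← List.getD_eq_getElem?_getD]; exact hbL
        simp [hbL']
      · have hne : ¬ (a = a ∧ j = b) := fun hc => h2 hc.2.symm
        rw [if_neg h2, ← List.getD_eq_getElem?_getD, ← pvGet2_natCast, hE a j hi hj]
        simp [show ¬ (j = b) from fun hc => h2 hc.symm]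
    · rw [if_neg h]
      have hne : ¬ (i = a ∧ j = b) := fun hc => h hc.1.symm
      rw [← pvGet2_natCast, hE i j hi hj]
      simp [hne]

-- the neighbour reads during/after the update of cell (r+1, c+1)
theorem AY_read_up (graph : List (List Int)) (r c k : Nat) :
    AY graph (r+1) k r (c+1) = fY (gv graph) r (c+1) := by
  unfold AY
  rcases Nat.eq_zero_or_pos r with h | h
  · subst h; simp [fY_zero_left]
  · have hc : (1 ≤ r ∧ 1 ≤ c+1) ∧ (r < r+1 ∨ (r = r+1 ∧ c+1 ≤ k)) := by omega
    simp [hc]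

theorem AY_read_left (graph : List (List Int)) (r c k : Nat) (hck : c ≤ k) :
    AY graph (r+1) k (r+1) c = fY (gv graph) (r+1) c := by
  unfold AY
  rcases Nat.eq_zero_or_pos c with h | h
  · subst h; simp [fY_zero_right]
  · have hc : (1 ≤ r+1 ∧ 1 ≤ c) ∧ (r+1 < r+1 ∨ (r+1 = r+1 ∧ c ≤ k)) := by omega
    rw [if_pos hc]

theorem AD_read_up (graph : List (List Int)) (r c k : Nat) :
    AD graph (r+1) k r (c+1) = fD (gv graph) r (c+1) := by
  unfold AD
  rcases Nat.eq_zero_or_pos r with h | h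
  · subst h; simp [fD_zero_left]
  · have hc : (1 ≤ r ∧ 1 ≤ c+1) ∧ (r < r+1 ∨ (r = r+1 ∧ c+1 ≤ k)) := by omega
    simp [hc]

theorem AD_read_left (graph : List (List Int)) (r c k : Nat) (hck : c ≤ k) :
    AD graph (r+1) k (r+1) c = fD (gv graph) (r+1) c := by
  unfold AD
  rcases Nat.eq_zero_or_pos c with h | h
  · subst h; simp [fD_zero_right]
  · have hc : (1 ≤ r+1 ∧ 1 ≤ c) ∧ (r+1 < r+1 ∨ (r+1 = r+1 ∧ c ≤ k)) := by omega
    rw [if_pos hc]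

-- writing cell (r+1, c+1) advances the table description by one column
theorem AY_write (graph : List (List Int)) (r c i j : Nat) :
    (if i = r+1 ∧ j = c+1 then fY (gv graph) (r+1) (c+1) else AY graph (r+1) c i j) =
      AY graph (r+1) (c+1) i j := by
  by_cases h : i = r+1 ∧ j = c+1
  · obtain ⟨h1, h2⟩ := h; subst h1; subst h2
    have hc : (1 ≤ r+1 ∧ 1 ≤ c+1) ∧ (r+1 < r+1 ∨ (r+1 = r+1 ∧ c+1 ≤ c+1)) := by omega
    simp [AY, hc]
  · simp only [h, if_false]
    unfold AY
    split_ifs <;> first | rfl | omega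

theorem AD_write (graph : List (List Int)) (r c i j : Nat) :
    (if i = r+1 ∧ j = c+1 then fD (gv graph) (r+1) (c+1) else AD graph (r+1) c i j) =
      AD graph (r+1) (c+1) i j := by
  by_cases h : i = r+1 ∧ j = c+1
  · obtain ⟨h1, h2⟩ := h; subst h1; subst h2
    have hc : (1 ≤ r+1 ∧ 1 ≤ c+1) ∧ (r+1 < r+1 ∨ (r+1 = r+1 ∧ c+1 ≤ c+1)) := by omega
    simp [AD, hc]
  · simp only [h, if_false]
    unfold AD
    split_ifs <;> first | rfl | omega

-- row r+1 fully written = ready to start row r+2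
theorem AY_rowdone (graph : List (List Int)) (m r i j : Nat) (hj : j ≤ m) :
    AY graph (r+1) m i j = AY graph (r+2) 0 i j := by
  unfold AY
  split_ifs <;> first | rfl | omega

theorem AD_rowdone (graph : List (List Int)) (m r i j : Nat) (hj : j ≤ m) :
    AD graph (r+1) m i j = AD graph (r+2) 0 i j := by
  unfold AD
  split_ifs <;> first | rfl | omega

-- one inner step of A preserves the invariant pair
theorem aStep_adv (graph : List (List Int)) (m r c : Nat) (hr : r < m) (hc : c < m)
    (TY TD : List (List Int))
    (hTY : Inv2 m TY (AY graph (r+1) c)) (hTD : Inv2 m TD (AD graph (r+1) c)) :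
    Inv2 m (aStep graph ((r:Int)+1) (TY, TD) ((c:Int)+1)).1 (AY graph (r+1) (c+1)) ∧
    Inv2 m (aStep graph ((r:Int)+1) (TY, TD) ((c:Int)+1)).2 (AD graph (r+1) (c+1)) := by
  have e1 : ((r:Int)+1-1) = ((r:Nat):Int) := by ring
  have e2 : ((c:Int)+1-1) = ((c:Nat):Int) := by ring
  have e3 : ((r:Int)+1) = (((r+1:Nat)):Int) := by push_cast; ring
  have e4 : ((c:Int)+1) = (((c+1:Nat)):Int) := by push_cast; ring
  have hv : pvGet2 graph ((r:Int)+1-1) ((c:Int)+1-1) = gv graph r c := by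
    rw [e1, e2, pvGet2_natCast]; rfl
  have hry : pvGet2 TY ((r:Int)+1-1) ((c:Int)+1) = fY (gv graph) r (c+1) := by
    rw [e1, e4, hTY.2.2 r (c+1) (by omega) (by omega), AY_read_up graph r c c]
  have hly : pvGet2 TY ((r:Int)+1) ((c:Int)+1-1) = fY (gv graph) (r+1) c := by
    rw [e2, e3, hTY.2.2 (r+1) c (by omega) (by omega), AY_read_left graph r c c (le_refl c)]
  have hrd : pvGet2 TD ((r:Int)+1-1) ((c:Int)+1) = fD (gv graph) r (c+1) := by
    rw [e1, e4, hTD.2.2 r (c+1) (by omega) (by omega), AD_read_up graph r c c]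
  have hld : pvGet2 TD ((r:Int)+1) ((c:Int)+1-1) = fD (gv graph) (r+1) c := by
    rw [e2, e3, hTD.2.2 (r+1) c (by omega) (by omega), AD_read_left graph r c c (le_refl c)]
  have hyval : max (pvGet2 TY ((r:Int)+1-1) ((c:Int)+1)) (pvGet2 TY ((r:Int)+1) ((c:Int)+1-1))
      + pvGet2 graph ((r:Int)+1-1) ((c:Int)+1-1) = fY (gv graph) (r+1) (c+1) := by
    rw [hry, hly, hv]; simp [fY]
  -- the updated yet table
  have hTY' : Inv2 m (pvSet2 TY ((r:Int)+1) ((c:Int)+1)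
      (max (pvGet2 TY ((r:Int)+1-1) ((c:Int)+1)) (pvGet2 TY ((r:Int)+1) ((c:Int)+1-1))
        + pvGet2 graph ((r:Int)+1-1) ((c:Int)+1-1))) (AY graph (r+1) (c+1)) := by
    rw [hyval, e3, e4]
    refine Inv2_congr m _ _ _ (Inv2_set m TY _ (r+1) (c+1) _ hTY (by omega) (by omega)) ?_
    intro i j _ _
    exact AY_write graph r c i j
  set TY' := pvSet2 TY ((r:Int)+1) ((c:Int)+1)
      (max (pvGet2 TY ((r:Int)+1-1) ((c:Int)+1)) (pvGet2 TY ((r:Int)+1) ((c:Int)+1-1))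
        + pvGet2 graph ((r:Int)+1-1) ((c:Int)+1-1)) with hTYdef
  -- reads from the updated yet table hit unchanged cells
  have hry' : pvGet2 TY' ((r:Int)+1-1) ((c:Int)+1) = fY (gv graph) r (c+1) := by
    rw [e1, e4, hTY'.2.2 r (c+1) (by omega) (by omega), AY_read_up graph r c (c+1)]
  have hly' : pvGet2 TY' ((r:Int)+1) ((c:Int)+1-1) = fY (gv graph) (r+1) c := by
    rw [e2, e3, hTY'.2.2 (r+1) c (by omega) (by omega), AY_read_left graph r c (c+1) (by omega)]
  have hdval : max (max (pvGet2 TD ((r:Int)+1-1) ((c:Int)+1)) (pvGet2 TD ((r:Int)+1) ((c:Int)+1-1))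
        + pvGet2 graph ((r:Int)+1-1) ((c:Int)+1-1))
      (max (pvGet2 TY' ((r:Int)+1-1) ((c:Int)+1)) (pvGet2 TY' ((r:Int)+1) ((c:Int)+1-1))
        + pvGet2 graph ((r:Int)+1-1) ((c:Int)+1-1) * 2) = fD (gv graph) (r+1) (c+1) := by
    rw [hrd, hld, hry', hly', hv]; simp [fD]
  have hTD' : Inv2 m (pvSet2 TD ((r:Int)+1) ((c:Int)+1)
      (max (max (pvGet2 TD ((r:Int)+1-1) ((c:Int)+1)) (pvGet2 TD ((r:Int)+1) ((c:Int)+1-1))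
        + pvGet2 graph ((r:Int)+1-1) ((c:Int)+1-1))
      (max (pvGet2 TY' ((r:Int)+1-1) ((c:Int)+1)) (pvGet2 TY' ((r:Int)+1) ((c:Int)+1-1))
        + pvGet2 graph ((r:Int)+1-1) ((c:Int)+1-1) * 2))) (AD graph (r+1) (c+1)) := by
    rw [hdval, e3, e4]
    refine Inv2_congr m _ _ _ (Inv2_set m TD _ (r+1) (c+1) _ hTD (by omega) (by omega)) ?_
    intro i j _ _
    exact AD_write graph r c i j
  exact ⟨hTY', hTD'⟩

-- A's inner loop over the first k columns
theorem aInner (graph : List (List Int)) (m r : Nat) (hr : r < m)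
    (TY TD : List (List Int))
    (hTY : Inv2 m TY (AY graph (r+1) 0)) (hTD : Inv2 m TD (AD graph (r+1) 0)) :
    ∀ k, k ≤ m →
      Inv2 m ((PySem.List.pyRange 1 ((k:Int)+1) 1).foldl
          (aStep graph ((r:Int)+1)) (TY, TD)).1 (AY graph (r+1) k) ∧
      Inv2 m ((PySem.List.pyRange 1 ((k:Int)+1) 1).foldl
          (aStep graph ((r:Int)+1)) (TY, TD)).2 (AD graph (r+1) k) := by
  intro k
  induction k with
  | zero =>
    intro _
    rw [show ((0:Nat):Int)+1 = 1 by norm_num, PySem.List.pyRange_one_eq_nil (by norm_num)]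
    exact ⟨hTY, hTD⟩
  | succ k ih =>
    intro hk
    have hcast : ((k+1 : Nat) : Int) + 1 = ((k : Int) + 1) + 1 := by push_cast; ring
    rw [hcast, PySem.List.pyRange_one_succ_right (by omega), List.foldl_append,
      List.foldl_cons, List.foldl_nil]
    obtain ⟨h1, h2⟩ := ih (by omega)
    have := aStep_adv graph m r k hr (by omega)
      ((PySem.List.pyRange 1 ((k:Int)+1) 1).foldl (aStep graph ((r:Int)+1)) (TY, TD)).1
      ((PySem.List.pyRange 1 ((k:Int)+1) 1).foldl (aStep graph ((r:Int)+1)) (TY, TD)).2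
      h1 h2
    exact this

-- A's outer loop over the first k rows
theorem aOuter (graph : List (List Int)) (m : Nat) (TY TD : List (List Int))
    (hTY : Inv2 m TY (AY graph 1 0)) (hTD : Inv2 m TD (AD graph 1 0)) :
    ∀ k, k ≤ m →
      Inv2 m ((PySem.List.pyRange 1 ((k:Int)+1) 1).foldl
          (aRow (m : Int) graph) (TY, TD)).1 (AY graph (k+1) 0) ∧
      Inv2 m ((PySem.List.pyRange 1 ((k:Int)+1) 1).foldl
          (aRow (m : Int) graph) (TY, TD)).2 (AD graph (k+1) 0) := by
  intro k
  induction k with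
  | zero =>
    intro _
    rw [show ((0:Nat):Int)+1 = 1 by norm_num, PySem.List.pyRange_one_eq_nil (by norm_num)]
    exact ⟨hTY, hTD⟩
  | succ k ih =>
    intro hk
    have hcast : ((k+1 : Nat) : Int) + 1 = ((k : Int) + 1) + 1 := by push_cast; ring
    rw [hcast, PySem.List.pyRange_one_succ_right (by omega), List.foldl_append,
      List.foldl_cons, List.foldl_nil]
    obtain ⟨h1, h2⟩ := ih (by omega)
    unfold aRow
    obtain ⟨g1, g2⟩ := aInner graph m k (by omega) _ _ h1 h2 m (le_refl m)
    constructor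
    · exact Inv2_congr m _ _ _ g1 (fun i j _ hj => AY_rowdone graph m k i j hj)
    · exact Inv2_congr m _ _ _ g2 (fun i j _ hj => AD_rowdone graph m k i j hj)

-- the initial tables of A (after the two presets) satisfy the invariant
theorem init_inv (graph : List (List Int)) (m : Nat) (hm1 : 1 ≤ m) :
    Inv2 m (pvSet2 ((PySem.List.pyRange 0 ((m:Int)+1) 1).map
        (fun _ => (PySem.List.pyRange 0 ((m:Int)+1) 1).map (fun _ => (0:Int)))) 1 1
        (pvGet2 graph 0 0)) (AY graph 1 0) ∧
    Inv2 m (pvSet2 ((PySem.List.pyRange 0 ((m:Int)+1) 1).map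
        (fun _ => (PySem.List.pyRange 0 ((m:Int)+1) 1).map (fun _ => (0:Int)))) 1 1
        (pvGet2 graph 0 0 * 2)) (AD graph 1 0) := by
  have hr : PySem.List.pyRange 0 ((m:Int)+1) 1 = (List.range (m+1)).map (fun (k : Nat) => (k : Int)) := by
    rw [show ((m:Int)+1) = ((m+1 : Nat) : Int) from by push_cast; ring,
      PySem.List.pyRange_zero_natCast]
  set row0 := (PySem.List.pyRange 0 ((m:Int)+1) 1).map (fun _ => (0:Int)) with hrow0
  set Z := (PySem.List.pyRange 0 ((m:Int)+1) 1).map (fun _ => row0) with hZ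
  have hlen0 : row0.length = m + 1 := by simp [hrow0, hr]
  have hlenZ : Z.length = m + 1 := by simp [hZ, hr]
  have hrows : ∀ i, i ≤ m → Z.getD i [] = row0 := by
    intro i hi
    rw [List.getD_eq_getElem?_getD, hZ, List.getElem?_map]
    have : i < (PySem.List.pyRange 0 ((m:Int)+1) 1).length := by
      rw [hr]; simpa using by omega
    rw [List.getElem?_eq_getElem this]
    rfl
  have hval0 : ∀ j, j ≤ m → row0.getD j 0 = 0 := by
    intro j hj
    rw [List.getD_eq_getElem?_getD, hrow0, List.getElem?_map]
    have : j < (PySem.List.pyRange 0 ((m:Int)+1) 1).length := by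
      rw [hr]; simpa using by omega
    rw [List.getElem?_eq_getElem this]
    rfl
  have hZinv : Inv2 m Z (fun _ _ => (0:Int)) := by
    refine ⟨hlenZ, ?_, ?_⟩
    · intro i hi; rw [hrows i hi]; exact hlen0
    · intro i j hi hj
      rw [pvGet2_natCast, hrows i hi]; exact hval0 j hj
  have h00 : pvGet2 graph 0 0 = gv graph 0 0 := by
    simp [pvGet2, gv, PySem.List.pyGetD_zero]
  constructor
  · have := Inv2_set m Z _ 1 1 (pvGet2 graph 0 0) hZinv (by omega) (by omega)
    simp only [Nat.cast_one] at this
    refine Inv2_congr m _ _ _ this ?_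
    intro i j _ _
    unfold AY
    rw [h00]
    split_ifs <;> first | rfl | omega
  · have := Inv2_set m Z _ 1 1 (pvGet2 graph 0 0 * 2) hZinv (by omega) (by omega)
    simp only [Nat.cast_one] at this
    refine Inv2_congr m _ _ _ this ?_
    intro i j _ _
    unfold AD
    rw [h00]
    split_ifs <;> first | rfl | omega

-- A's port computes fD m m
theorem solution_eq_fD (graph : List (List Int)) (m : Nat) (hm1 : 1 ≤ m) :
    solution (m : Int) graph = fD (gv graph) m m := by
  unfold solution
  obtain ⟨hY, hD⟩ := init_inv graph m hm1
  obtain ⟨g1, g2⟩ := aOuter graph m _ _ hY hD m (le_refl m)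
  rw [g2.2.2 m m (le_refl m) (le_refl m)]
  unfold AD
  have hc : (1 ≤ m ∧ 1 ≤ m) ∧ (m < m+1 ∨ (m = m+1 ∧ m ≤ 0)) := by omega
  rw [if_pos hc]

theorem solution_eq (n : Int) (graph : List (List Int)) (h : Pre_solution n graph) :
    solution n graph = solution_alt n graph := by
  obtain ⟨h1, _, _⟩ := h
  have hn : n = ((n.toNat : Nat) : Int) := by omega
  rw [hn]
  rw [solution_eq_fD graph n.toNat (by omega), solution_alt_eq graph n.toNat]

-- ===== VERDICT (by name: the statement is the Claim_ definition above) =====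
theorem solution_spec : Claim_equal_solution := by
  intro n graph _ hpre
  unfold Spec_solution
  exact solution_eq n graph hpre
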